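-- pv_equiv track=rewrite | github.com/Ji-Un-Gil/BOJ_solved | 프로그래머스/lv2/92342. 양궁대회/양궁대회.py | compare_best_result
-- ===== SOURCE A (Python) =====
-- def compare_best_result(diff, diff2, ryan, ryan2):
--     if diff == diff2:
--         for idx in range(10, -1, -1):
--             if ryan[idx] < ryan2[idx]:
--                 return ryan2
--             elif ryan[idx] > ryan2[idx]:
--                 return ryan
--         return ryan
--     elif diff > diff2:
--         return ryan
--     return ryan2
-- ===== SOURCE B (Python) =====
-- def compare_best_result(diff, diff2, ryan, ryan2):
--     if (diff, ryan[:11][::-1]) >= (diff2, ryan2[:11][::-1]):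
--         return ryan
--     return ryan2
-- ===== Notes on version B (the rewrite author's own statement) =====
-- stated objective: simpler
-- what changed: The explicit reversed index loop with three branches is collapsed into a single lexicographic comparison of the tuples (diff, reversed 11-prefix) via Python's built-in tuple/list ordering.
import Mathlib
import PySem

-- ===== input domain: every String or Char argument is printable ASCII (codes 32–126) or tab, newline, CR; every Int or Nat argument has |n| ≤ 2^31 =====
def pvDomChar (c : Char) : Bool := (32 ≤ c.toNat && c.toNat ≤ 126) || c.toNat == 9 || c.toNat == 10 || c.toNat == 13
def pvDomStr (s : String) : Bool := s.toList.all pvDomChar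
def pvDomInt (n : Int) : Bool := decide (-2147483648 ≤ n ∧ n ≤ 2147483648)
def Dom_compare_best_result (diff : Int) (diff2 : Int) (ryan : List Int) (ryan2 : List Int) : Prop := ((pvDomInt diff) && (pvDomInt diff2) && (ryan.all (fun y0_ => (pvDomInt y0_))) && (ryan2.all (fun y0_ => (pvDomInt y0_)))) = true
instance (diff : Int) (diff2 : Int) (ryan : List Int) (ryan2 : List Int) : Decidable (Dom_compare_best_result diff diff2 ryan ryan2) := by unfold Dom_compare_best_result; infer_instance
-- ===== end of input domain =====

-- B replaces A's explicit reversed index loop by one lexicographic comparison of (diff, reversed 11-prefix): simpler, same cost.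

-- ===== PORT A =====
-- the 'for idx in range(10, -1, -1)' loop; '[]' is the IndexError branch, excluded by Pre_
def pvLoopA (ryan ryan2 : List Int) : List Int → List Int
  | [] => ryan
  | idx :: rest =>
    match PySem.List.pyGet? ryan idx, PySem.List.pyGet? ryan2 idx with
    | some a, some b =>
      if a < b then ryan2
      else if a > b then ryan
      else pvLoopA ryan ryan2 rest
    | _, _ => []

def compare_best_result (diff : Int) (diff2 : Int) (ryan : List Int) (ryan2 : List Int) : List Int :=
  if diff = diff2 then pvLoopA ryan ryan2 (PySem.List.pyRange 10 (-1) (-1))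
  else if diff > diff2 then ryan
  else ryan2

-- ===== PORT B =====
-- Python's '>=' on int lists (lexicographic, shorter prefix is smaller) — exact hand port
def pvLexGe : List Int → List Int → Bool
  | [], [] => true
  | [], _ :: _ => false
  | _ :: _, [] => true
  | a :: as_, b :: bs =>
    if a > b then true
    else if a < b then false
    else pvLexGe as_ bs

def compare_best_result_alt (diff : Int) (diff2 : Int) (ryan : List Int) (ryan2 : List Int) : List Int :=
  -- '(diff, ryan[:11][::-1]) >= (diff2, ryan2[:11][::-1])' expanded component-wise
  let r1 := (PySem.List.slice? (PySem.List.slice ryan none (some 11)) none none (-1)).getD []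
  let r2 := (PySem.List.slice? (PySem.List.slice ryan2 none (some 11)) none none (-1)).getD []
  if diff > diff2 then ryan
  else if diff < diff2 then ryan2
  else if pvLexGe r1 r2 then ryan else ryan2

-- ===== PRECONDITION & SPEC =====
-- Pre_ excludes exactly the inputs where A raises IndexError: a tie with a list shorter than 11
def Pre_compare_best_result (diff : Int) (diff2 : Int) (ryan : List Int) (ryan2 : List Int) : Prop :=
  diff = diff2 → (11 ≤ ryan.length ∧ 11 ≤ ryan2.length)
instance (diff : Int) (diff2 : Int) (ryan : List Int) (ryan2 : List Int) : Decidable (Pre_compare_best_result diff diff2 ryan ryan2) := by unfold Pre_compare_best_result; infer_instance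

def pvWitness_compare_best_result : Int × Int × List Int × List Int :=
  (0, 0, [0,1,2,3,4,5,6,7,8,9,10], [0,1,2,3,4,5,6,7,8,9,9])

def Spec_compare_best_result (diff : Int) (diff2 : Int) (ryan : List Int) (ryan2 : List Int) (out : List Int) : Prop := out = compare_best_result_alt diff diff2 ryan ryan2
instance (diff : Int) (diff2 : Int) (ryan : List Int) (ryan2 : List Int) (out : List Int) : Decidable (Spec_compare_best_result diff diff2 ryan ryan2 out) := by unfold Spec_compare_best_result; infer_instance

-- ===== CLAIM (what is proved, stated in full; the proofs are below) =====
def Claim_equal_compare_best_result : Prop := ∀ (diff : Int) (diff2 : Int) (ryan : List Int) (ryan2 : List Int), Dom_compare_best_result diff diff2 ryan ryan2 → Pre_compare_best_result diff diff2 ryan ryan2 → Spec_compare_best_result diff diff2 ryan ryan2 (compare_best_result diff diff2 ryan ryan2)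


-- ===== LEMMAS AND PROOFS =====

-- A's loop over valid Nat indices decides the lexicographic comparison of the indexed elements
lemma pvLoopA_eq_lexGe (xs ys : List Int) : ∀ (is_ : List Nat),
    (∀ i ∈ is_, i < xs.length ∧ i < ys.length) →
    pvLoopA xs ys (is_.map Int.ofNat) =
      if pvLexGe (is_.map fun i => xs.getD i 0) (is_.map fun i => ys.getD i 0) then xs else ys
  | [], _ => by simp [pvLoopA, pvLexGe]
  | i :: rest, h => by
    have hi := h i (by simp)
    have hx : PySem.List.pyGet? xs (Int.ofNat i) = some (xs.getD i 0) := by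
      rw [show Int.ofNat i = (i : Int) from rfl, PySem.List.pyGet?_natCast,
        List.getElem?_eq_getElem hi.1, List.getD_eq_getElem _ _ hi.1]
    have hy : PySem.List.pyGet? ys (Int.ofNat i) = some (ys.getD i 0) := by
      rw [show Int.ofNat i = (i : Int) from rfl, PySem.List.pyGet?_natCast,
        List.getElem?_eq_getElem hi.2, List.getD_eq_getElem _ _ hi.2]
    have ih := pvLoopA_eq_lexGe xs ys rest (fun j hj => h j (List.mem_cons_of_mem _ hj))
    rw [List.map_cons, List.map_cons, List.map_cons, pvLoopA, hx, hy, pvLexGe]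
    rcases lt_trichotomy (xs[i]?.getD 0) (ys[i]?.getD 0) with hlt | heq | hgt
    · simp [List.getD, hlt, not_lt.mpr hlt.le]
    · have hnlt : ¬ xs[i]?.getD 0 < ys[i]?.getD 0 := by omega
      have hngt : ¬ ys[i]?.getD 0 < xs[i]?.getD 0 := by omega
      simpa [List.getD, hnlt, hngt] using ih
    · simp [List.getD, hgt, not_lt.mpr hgt.le]

lemma pvIdx_list : PySem.List.pyRange 10 (-1) (-1) =
    (([10,9,8,7,6,5,4,3,2,1,0] : List Nat).map Int.ofNat) := by decide

lemma pvMap_getD_eq_rev_take (xs : List Int) (h : 11 ≤ xs.length) :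
    (([10,9,8,7,6,5,4,3,2,1,0] : List Nat).map fun i => xs.getD i 0) = (xs.take 11).reverse := by
  match xs, h with
  | a0::a1::a2::a3::a4::a5::a6::a7::a8::a9::a10::t, _ => simp [List.getD]

lemma pvRev_prefix (xs : List Int) :
    ((PySem.List.slice? (PySem.List.slice xs none (some 11)) none none (-1)).getD []) = (xs.take 11).reverse := by
  have h1 : PySem.List.slice xs none (some 11) = xs.take 11 := by
    have := PySem.List.slice_to_natCast xs 11
    simpa using this
  rw [h1, PySem.List.slice?_none_none_neg_one]
  rfl

-- ===== VERDICT (by name: the statement is the Claim_ definition above) =====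
theorem compare_best_result_spec : Claim_equal_compare_best_result := by
  intro diff diff2 ryan ryan2 _ hpre
  unfold Spec_compare_best_result compare_best_result compare_best_result_alt
  by_cases h : diff = diff2
  · obtain ⟨h1, h2⟩ := hpre h
    subst h
    simp only [lt_irrefl, pvRev_prefix]
    rw [pvIdx_list, pvLoopA_eq_lexGe ryan ryan2 _ (by intro i hi; fin_cases hi <;> omega),
      pvMap_getD_eq_rev_take ryan h1, pvMap_getD_eq_rev_take ryan2 h2]
    simp
  · rcases lt_trichotomy diff diff2 with hlt | heq | hgt
    · simp [h, hlt, not_lt.mpr (le_of_lt hlt)]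
    · exact absurd heq h
    · simp [h, hgt]
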